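-- pv_equiv track=rewrite | github.com/mattjhussey/pemjh | src/pemjh/challenge204/main.py | getHams
-- ===== SOURCE A (Python) =====
-- def getHams(current, limit, primes):
--     nCount = 0
--     for p in primes:
--         # Multiply current by p until limit is hit
--         pCurrent = current * p
--         if pCurrent > limit:
--             # all following will breach too
--             break
--
--         while pCurrent <= limit:
--             nCount += 1
--             nCount += getHams(pCurrent, limit, primes[primes.index(p) + 1:])
--             pCurrent *= p
--
--     return nCount
-- ===== SOURCE B (Python) =====
-- def getHams(current, limit, primes):
--     """Iterative re-implementation: an explicit worklist (stack) of
--     (value, remaining-primes) tasks replaces A's recursion."""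
--     nCount = 0
--     stack = [(current, primes)]
--     while stack:
--         cur, ps = stack.pop()
--         for p in ps:
--             pCurrent = cur * p
--             if pCurrent > limit:
--                 break
--             while pCurrent <= limit:
--                 nCount += 1
--                 stack.append((pCurrent, ps[ps.index(p) + 1:]))
--                 pCurrent *= p
--     return nCount
-- ===== Notes on version B (the rewrite author's own statement) =====
-- stated objective: alternative
-- what changed: A's recursion is replaced by an explicit iterative worklist: a stack of (value, remaining-primes) tasks and one running counter; each pop runs the same per-prime break/while logic once and pushes its sub-tasks instead of recursing.
import Mathlib
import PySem

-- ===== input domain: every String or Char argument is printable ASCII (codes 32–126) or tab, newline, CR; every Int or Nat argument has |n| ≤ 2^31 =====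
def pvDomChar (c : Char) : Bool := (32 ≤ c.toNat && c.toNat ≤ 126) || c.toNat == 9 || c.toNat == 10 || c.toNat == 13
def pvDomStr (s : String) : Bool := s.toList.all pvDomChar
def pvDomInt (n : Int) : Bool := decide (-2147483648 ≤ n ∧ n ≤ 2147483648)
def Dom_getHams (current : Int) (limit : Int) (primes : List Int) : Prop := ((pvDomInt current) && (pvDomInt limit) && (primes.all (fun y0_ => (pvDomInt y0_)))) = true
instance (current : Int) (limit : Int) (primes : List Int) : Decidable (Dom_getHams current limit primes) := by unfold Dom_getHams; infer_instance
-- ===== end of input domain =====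

-- B replaces A's recursion by an explicit worklist of (value, primes) tasks with a running
-- counter (objective: alternative decomposition, same cost); equal return value on every input.

-- ===== PORT A =====
-- Port of A (recursive).  The inner 'while pCurrent <= limit' loop does not terminate in
-- Python on some inputs (e.g. p = 1 or current = 0 with pCurrent ≤ limit); the Lean loop
-- carries the constant fuel 128 as a totality guard, which exceeds the iteration count of
-- every terminating loop execution on Dom's ints (|n| ≤ 2^31 gives < 70 iterations); on
-- inputs where Python diverges nothing is claimed about the Python behaviour.
def aWhile (limit p : Int) (rec : Int → Int) : Nat → Int → Int
  | 0, _ => 0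
  | fuel+1, pCurrent =>
    if pCurrent ≤ limit then 1 + rec pCurrent + aWhile limit p rec fuel (pCurrent * p) else 0

-- primes[primes.index(p) + 1:] : index of the FIRST occurrence; the 'none' branch is
-- unreachable in A's calls (p is always drawn from primes; Python would raise ValueError).
def aSuffix (primes : List Int) (p : Int) : List Int :=
  match PySem.List.index? primes p with
  | some i => primes.drop (i + 1)
  | none => []

mutual
def getHams (current : Int) (limit : Int) (primes : List Int) : Int :=
  aGo current limit primes primes
termination_by (primes.length + 1, 0)

-- the 'for p in primes' loop of A; rest is the part of primes still to be visited
def aGo (current : Int) (limit : Int) (primes rest : List Int) : Int :=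
  match rest with
  | [] => 0
  | p :: rs =>
    let pCurrent := current * p
    if limit < pCurrent then 0          -- break: the rest of the for loop adds nothing
    else
      aWhile limit p
        (fun pc => if _h : (aSuffix primes p).length < primes.length
                   then getHams pc limit (aSuffix primes p) else 0)   -- guard = totality only
        128 pCurrent
      + aGo current limit primes rs
termination_by (primes.length, rest.length + 1)
decreasing_by
  · rcases lt_or_eq_of_le (Nat.succ_le_of_lt _h) with h3 | h3
    · exact Prod.Lex.left _ _ h3
    · rw [← h3]; exact Prod.Lex.right _ (by omega)
  · exact Prod.Lex.right _ (by simp)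
end

-- ===== PORT B =====
-- ps[ps.index(p) + 1:] of Source B, as in A's helper.
def bSuffix (ps : List Int) (p : Int) : List Int :=
  match PySem.List.index? ps p with
  | some i => ps.drop (i + 1)
  | none => []

-- the inner 'while pCurrent <= limit' of Source B: returns (count added, tasks pushed in
-- push order); same constant fuel 128 as the A port, for the same reason.
def bWhile (limit p : Int) (suffix : List Int) : Nat → Int → Int × List (Int × List Int)
  | 0, _ => (0, [])
  | fuel+1, pCurrent =>
    if pCurrent ≤ limit then
      let r := bWhile limit p suffix fuel (pCurrent * p)
      (1 + r.1, (pCurrent, suffix) :: r.2)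
    else (0, [])

-- the 'for p in ps' body run for one popped task (cur, ps)
def bTask (limit cur : Int) (ps rest : List Int) : Int × List (Int × List Int) :=
  match rest with
  | [] => (0, [])
  | p :: rs =>
    let pCurrent := cur * p
    if limit < pCurrent then (0, [])
    else
      let r1 := bWhile limit p (bSuffix ps p) 128 pCurrent
      let r2 := bTask limit cur ps rs
      (r1.1 + r2.1, r1.2 ++ r2.2)

-- termination measure for the stack loop (every pushed task has a strictly shorter
-- primes list, and one pop pushes at most ps.length * 128 tasks)
def bMeasure (n : Nat) : Nat := 131 ^ n * n.factorial

lemma bWhile_snd_length (limit p : Int) (s : List Int) :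
    ∀ (fuel : Nat) (pc : Int), (bWhile limit p s fuel pc).2.length ≤ fuel := by
  intro fuel
  induction fuel with
  | zero => intro pc; simp [bWhile]
  | succ n ih =>
    intro pc
    simp only [bWhile]
    split
    · simpa using Nat.succ_le_succ (ih _)
    · simp

lemma bWhile_snd_mem (limit p : Int) (s : List Int) :
    ∀ (fuel : Nat) (pc : Int) (t : Int × List Int), t ∈ (bWhile limit p s fuel pc).2 → t.2 = s := by
  intro fuel
  induction fuel with
  | zero => intro pc t h; simp [bWhile] at h
  | succ n ih =>
    intro pc t h
    simp only [bWhile] at h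
    split at h
    · rcases List.mem_cons.1 h with h | h
      · simp [h]
      · exact ih _ _ h
    · simp at h

lemma bTask_snd_length (limit cur : Int) (ps : List Int) :
    ∀ rest, (bTask limit cur ps rest).2.length ≤ rest.length * 128 := by
  intro rest
  induction rest with
  | nil => simp [bTask]
  | cons p rs ih =>
    simp only [bTask]
    split
    · simp
    · simp only [List.length_append, List.length_cons]
      have h1 := bWhile_snd_length limit p (bSuffix ps p) 128 (cur * p)
      calc (bWhile limit p (bSuffix ps p) 128 (cur * p)).2.length
            + (bTask limit cur ps rs).2.length
          ≤ 128 + rs.length * 128 := Nat.add_le_add h1 ih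
        _ = (rs.length + 1) * 128 := by ring

lemma bTask_snd_mem (limit cur : Int) (ps : List Int) :
    ∀ rest (t : Int × List Int), t ∈ (bTask limit cur ps rest).2 → ∃ p, t.2 = bSuffix ps p := by
  intro rest
  induction rest with
  | nil => intro t h; simp [bTask] at h
  | cons p rs ih =>
    intro t h
    simp only [bTask] at h
    split at h
    · simp at h
    · rcases List.mem_append.1 h with h | h
      · exact ⟨p, bWhile_snd_mem _ _ _ _ _ _ h⟩
      · exact ih _ h

lemma bSuffix_length_lt (ps : List Int) (p : Int) (hps : ps ≠ []) :
    (bSuffix ps p).length < ps.length := by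
  have hpos : 0 < ps.length := List.length_pos_iff.2 hps
  unfold bSuffix
  split
  · simp only [List.length_drop]; omega
  · simpa using hpos

lemma bMeasure_pos (n : Nat) : 0 < bMeasure n :=
  Nat.mul_pos (Nat.pow_pos (by omega)) n.factorial_pos

lemma bMeasure_mono {m n : Nat} (h : m ≤ n) :
    bMeasure m ≤ bMeasure n :=
  Nat.mul_le_mul (Nat.pow_le_pow_right (by omega) h) (Nat.factorial_le h)

lemma bTask_measure_lt (limit cur : Int) (ps : List Int) :
    ((bTask limit cur ps ps).2.map (fun t => bMeasure t.2.length)).sum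
      < bMeasure ps.length := by
  rcases eq_or_ne ps ([] : List Int) with h | h
  · subst h; simpa [bTask] using bMeasure_pos 0
  · have hpos : 0 < ps.length := List.length_pos_iff.2 h
    have hbound : ∀ x ∈ (bTask limit cur ps ps).2.map (fun t => bMeasure t.2.length),
        x ≤ bMeasure (ps.length - 1) := by
      intro x hx
      rcases List.mem_map.1 hx with ⟨t, ht, rfl⟩
      rcases bTask_snd_mem limit cur ps ps t ht with ⟨p, hp⟩
      have hlt := bSuffix_length_lt ps p h
      rw [hp] at *
      exact bMeasure_mono (by omega)
    have hsum := List.sum_le_card_nsmul _ _ hbound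
    have hlen : ((bTask limit cur ps ps).2.map (fun t => bMeasure t.2.length)).length
        ≤ ps.length * 128 := by
      simpa using bTask_snd_length limit cur ps ps
    have hB := bMeasure_pos (ps.length - 1)
    have hstep : bMeasure ps.length
        = 131 * ps.length * bMeasure (ps.length - 1) := by
      unfold bMeasure
      obtain ⟨k, hk⟩ : ∃ k, ps.length = k + 1 := ⟨ps.length - 1, by omega⟩
      rw [hk]
      simp [pow_succ, Nat.factorial_succ]
      ring
    have : ((bTask limit cur ps ps).2.map (fun t => bMeasure t.2.length)).sum
        ≤ ps.length * 128 * bMeasure (ps.length - 1) := by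
      calc ((bTask limit cur ps ps).2.map (fun t => bMeasure t.2.length)).sum
          ≤ ((bTask limit cur ps ps).2.map (fun t => bMeasure t.2.length)).length
              * bMeasure (ps.length - 1) := by simpa [smul_eq_mul] using hsum
        _ ≤ ps.length * 128 * bMeasure (ps.length - 1) :=
              Nat.mul_le_mul_right _ hlen
    refine this.trans_lt ?_
    rw [hstep]
    have hlt : ps.length * 128 < 131 * ps.length := by nlinarith
    exact Nat.mul_lt_mul_of_lt_of_le hlt (le_refl _) hB

-- the 'while stack:' loop of Source B.  The Python list's END is this list's HEAD
-- (pop = head, append = cons after reversing the freshly pushed block).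
def bLoop (limit : Int) (stack : List (Int × List Int)) (nCount : Int) : Int :=
  match stack with
  | [] => nCount
  | (cur, ps) :: rest =>
    let r := bTask limit cur ps ps
    bLoop limit (r.2.reverse ++ rest) (nCount + r.1)
termination_by (stack.map (fun t => bMeasure t.2.length)).sum
decreasing_by
  simp only [List.map_append, List.map_reverse, List.sum_append, List.sum_reverse,
    List.map_cons, List.sum_cons]
  have := bTask_measure_lt limit cur ps
  omega

def getHams_alt (current : Int) (limit : Int) (primes : List Int) : Int :=
  bLoop limit [(current, primes)] 0

-- ===== PRECONDITION & SPEC =====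
def Spec_getHams (current : Int) (limit : Int) (primes : List Int) (out : Int) : Prop := out = getHams_alt current limit primes
instance (current : Int) (limit : Int) (primes : List Int) (out : Int) : Decidable (Spec_getHams current limit primes out) := by unfold Spec_getHams; infer_instance

-- ===== CLAIM (what is proved, stated in full; the proofs are below) =====
def Claim_equal_getHams : Prop := ∀ (current : Int) (limit : Int) (primes : List Int), Dom_getHams current limit primes → Spec_getHams current limit primes (getHams current limit primes)

-- ===== LEMMAS AND PROOFS =====

lemma getHams_nil (c l : Int) : getHams c l [] = 0 := by
  rw [getHams.eq_def, aGo.eq_def]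

lemma aSuffix_eq_bSuffix : aSuffix = bSuffix := rfl

-- the totality guard in aGo never changes the value
lemma rec_guard_eq (primes : List Int) (p : Int) (limit pc : Int) :
    (if _h : (aSuffix primes p).length < primes.length
     then getHams pc limit (aSuffix primes p) else 0)
      = getHams pc limit (aSuffix primes p) := by
  rcases eq_or_ne primes ([] : List Int) with h | h
  · subst h
    rw [dif_neg (by simp [aSuffix, PySem.List.index?])]
    rw [show aSuffix ([] : List Int) p = [] from rfl, getHams_nil]
  · rw [dif_pos (by rw [aSuffix_eq_bSuffix]; exact bSuffix_length_lt primes p h)]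

lemma aWhile_eq_bWhile (limit p : Int) (s : List Int) (rec : Int → Int)
    (hrec : ∀ pc, rec pc = getHams pc limit s) :
    ∀ (fuel : Nat) (pc : Int),
      aWhile limit p rec fuel pc
        = (bWhile limit p s fuel pc).1
          + ((bWhile limit p s fuel pc).2.map (fun t => getHams t.1 limit t.2)).sum := by
  intro fuel
  induction fuel with
  | zero => intro pc; simp [aWhile, bWhile]
  | succ n ih =>
    intro pc
    simp only [aWhile, bWhile]
    split
    · simp only [List.map_cons, List.sum_cons]
      rw [hrec, ih]
      ring
    · simp

lemma aGo_eq_bTask (limit cur : Int) (ps : List Int) :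
    ∀ rest, aGo cur limit ps rest
      = (bTask limit cur ps rest).1
        + ((bTask limit cur ps rest).2.map (fun t => getHams t.1 limit t.2)).sum := by
  intro rest
  induction rest with
  | nil => rw [aGo.eq_def, bTask.eq_def]; simp
  | cons p rs ih =>
    rw [aGo.eq_def]
    simp only [bTask]
    split
    · simp
    · have hrec : ∀ pc,
          (if _h : (aSuffix ps p).length < ps.length
           then getHams pc limit (aSuffix ps p) else 0) = getHams pc limit (bSuffix ps p) := by
        intro pc
        rw [rec_guard_eq, aSuffix_eq_bSuffix]
      rw [aWhile_eq_bWhile limit p (bSuffix ps p) _ hrec, ih]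
      simp only [List.map_append, List.sum_append]
      ring

lemma bLoop_eq_sum (limit : Int) :
    ∀ (stack : List (Int × List Int)) (n : Int),
      bLoop limit stack n = n + (stack.map (fun t => getHams t.1 limit t.2)).sum := by
  intro stack n
  induction stack, n using bLoop.induct limit with
  | case1 n => rw [bLoop.eq_def]; simp
  | case2 n cur ps rest r ih =>
    have hr : r = bTask limit cur ps ps := rfl
    rw [hr] at ih
    rw [bLoop.eq_def]
    show bLoop limit ((bTask limit cur ps ps).2.reverse ++ rest)
        (n + (bTask limit cur ps ps).1)
      = n + (((cur, ps) :: rest).map (fun t => getHams t.1 limit t.2)).sum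
    rw [ih]
    simp only [List.map_append, List.map_reverse, List.sum_append, List.sum_reverse,
      List.map_cons, List.sum_cons]
    have hv : getHams cur limit ps
        = (bTask limit cur ps ps).1
          + ((bTask limit cur ps ps).2.map (fun t => getHams t.1 limit t.2)).sum := by
      rw [getHams.eq_def]; exact aGo_eq_bTask limit cur ps ps
    rw [hv]; ring

lemma getHams_eq_alt (c l : Int) (ps : List Int) : getHams c l ps = getHams_alt c l ps := by
  rw [getHams_alt, bLoop_eq_sum]
  simp

-- ===== VERDICT (by name: the statement is the Claim_ definition above) =====
theorem getHams_spec : Claim_equal_getHams := by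
  intro current limit primes _
  show getHams current limit primes = getHams_alt current limit primes
  exact getHams_eq_alt current limit primes
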